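-- pv_equiv track=rewrite | github.com/MrChepe09/Competitive-Programming-Codes | TCS Codevita 2020/rotate.py | apply
-- ===== SOURCE A (Python) =====
-- def apply(a, arr, s, n, m):
--     d = 0
--     done = []
--     for i in range(s, n):
--         for j in range(s, m):
--             if(i == s and [i, j] not in done):
--                 a[i][j] = arr[d]
--                 done.append([i, j])
--                 d+=1
--     for i in range(s, n):
--         for j in range(s, m):
--             if(i!=s and j==m-1 and [i, j] not in done):
--                 a[i][j] = arr[d]
--                 done.append([i, j])
--                 d+=1
--     for i in range(n-1, s-1, -1):
--         for j in range(m-1, s-1, -1):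
--             if(i==n-1 and j!=m-1 and [i, j] not in done):
--                 a[i][j] = arr[d]
--                 d+=1
--                 done.append([i, j])
--     for i in range(n-1, s-1, -1):
--         for j in range(m-1, s-1, -1):
--             if(i!=n-1 and j==s and [i, j] not in done):
--                 a[i][j] = arr[d]
--                 d+=1
--                 done.append([i, j])
--     return a
-- ===== SOURCE B (Python) =====
-- def apply(a, arr, s, n, m):
--     if s < n and s < m:
--         d = 0
--         for j in range(s, m):
--             a[s][j] = arr[d]
--             d += 1
--         for i in range(s + 1, n):
--             a[i][m - 1] = arr[d]
--             d += 1
--         if s < n - 1: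
--             for j in range(m - 2, s - 1, -1):
--                 a[n - 1][j] = arr[d]
--                 d += 1
--         if s < m - 1:
--             for i in range(n - 2, s, -1):
--                 a[i][s] = arr[d]
--                 d += 1
--     return a
-- ===== Notes on version B (the rewrite author's own statement) =====
-- stated objective: alternative
-- what changed: B traverses the four perimeter segments of the submatrix directly (top row, right column, bottom row, left column) placing arr values incrementally, instead of A's four full grid sweeps that each test every cell against a growing done-list by linear scan.
import Mathlib
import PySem

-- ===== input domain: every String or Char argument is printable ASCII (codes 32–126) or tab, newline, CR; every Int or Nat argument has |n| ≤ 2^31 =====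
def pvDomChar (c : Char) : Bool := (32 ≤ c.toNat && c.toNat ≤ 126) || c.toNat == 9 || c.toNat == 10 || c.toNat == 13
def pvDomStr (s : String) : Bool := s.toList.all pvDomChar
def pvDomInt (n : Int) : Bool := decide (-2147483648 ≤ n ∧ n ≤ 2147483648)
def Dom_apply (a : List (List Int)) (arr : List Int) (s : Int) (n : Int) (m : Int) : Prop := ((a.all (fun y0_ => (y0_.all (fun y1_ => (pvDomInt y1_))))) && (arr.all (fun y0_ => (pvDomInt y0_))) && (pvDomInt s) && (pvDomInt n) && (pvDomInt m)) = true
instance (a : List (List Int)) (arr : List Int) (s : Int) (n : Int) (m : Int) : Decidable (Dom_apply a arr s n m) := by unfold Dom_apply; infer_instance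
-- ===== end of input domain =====

-- B fills the submatrix boundary by walking its four perimeter segments directly, instead of A's
-- four full-grid sweeps each scanning a growing done-list; equivalence is about the RETURN value
-- (both Pythons also mutate the matrix argument in place, in the same way).

-- shared primitive: the Python statement `a[i][j] = v`
-- (exact for 0 ≤ i < len(a) and 0 ≤ j < len(a[i]), which Pre_apply guarantees for every executed write)
def setCell (a : List (List Int)) (i j : Int) (v : Int) : List (List Int) :=
  a.set i.toNat ((a.getD i.toNat []).set j.toNat v)

-- state of A's loops: the matrix, the counter d, and the `done` list of [i, j] pairs
structure PvSt where
  mat : List (List Int)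
  d : Int
  done : List (List Int)

-- ===== PORT A =====
def apply (a : List (List Int)) (arr : List Int) (s : Int) (n : Int) (m : Int) : List (List Int) :=
  let st0 : PvSt := ⟨a, 0, []⟩
  let st1 := (PySem.List.pyRange s n 1).foldl (fun st i =>
      (PySem.List.pyRange s m 1).foldl (fun st j =>
        if i = s ∧ [i, j] ∉ st.done then
          ⟨setCell st.mat i j (PySem.List.pyGetD arr st.d 0), st.d + 1, st.done ++ [[i, j]]⟩
        else st) st) st0
  let st2 := (PySem.List.pyRange s n 1).foldl (fun st i =>
      (PySem.List.pyRange s m 1).foldl (fun st j =>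
        if i ≠ s ∧ j = m - 1 ∧ [i, j] ∉ st.done then
          ⟨setCell st.mat i j (PySem.List.pyGetD arr st.d 0), st.d + 1, st.done ++ [[i, j]]⟩
        else st) st) st1
  let st3 := (PySem.List.pyRange (n - 1) (s - 1) (-1)).foldl (fun st i =>
      (PySem.List.pyRange (m - 1) (s - 1) (-1)).foldl (fun st j =>
        if i = n - 1 ∧ j ≠ m - 1 ∧ [i, j] ∉ st.done then
          ⟨setCell st.mat i j (PySem.List.pyGetD arr st.d 0), st.d + 1, st.done ++ [[i, j]]⟩
        else st) st) st2
  let st4 := (PySem.List.pyRange (n - 1) (s - 1) (-1)).foldl (fun st i =>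
      (PySem.List.pyRange (m - 1) (s - 1) (-1)).foldl (fun st j =>
        if i ≠ n - 1 ∧ j = s ∧ [i, j] ∉ st.done then
          ⟨setCell st.mat i j (PySem.List.pyGetD arr st.d 0), st.d + 1, st.done ++ [[i, j]]⟩
        else st) st) st3
  st4.mat

-- ===== PORT B =====
def apply_alt (a : List (List Int)) (arr : List Int) (s : Int) (n : Int) (m : Int) : List (List Int) :=
  if s < n ∧ s < m then
    let p1 := (PySem.List.pyRange s m 1).foldl
      (fun p j => (setCell p.1 s j (PySem.List.pyGetD arr p.2 0), p.2 + 1)) (a, (0 : Int))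
    let p2 := (PySem.List.pyRange (s + 1) n 1).foldl
      (fun p i => (setCell p.1 i (m - 1) (PySem.List.pyGetD arr p.2 0), p.2 + 1)) p1
    let p3 := if s < n - 1 then
        (PySem.List.pyRange (m - 2) (s - 1) (-1)).foldl
          (fun p j => (setCell p.1 (n - 1) j (PySem.List.pyGetD arr p.2 0), p.2 + 1)) p2
      else p2
    let p4 := if s < m - 1 then
        (PySem.List.pyRange (n - 2) s (-1)).foldl
          (fun p i => (setCell p.1 i s (PySem.List.pyGetD arr p.2 0), p.2 + 1)) p3
      else p3
    p4.1
  else a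

-- ===== PRECONDITION & SPEC =====
-- When the boundary is non-empty Pre_apply requires 0 ≤ s (the task's natural domain: with a
-- negative start layer, A's writes go through Python's negative-index wraparound) and otherwise
-- admits exactly the inputs on which A returns: the touched rows exist, are at least m wide,
-- and arr holds at least as many values as there are boundary cells.
def Pre_apply (a : List (List Int)) (arr : List Int) (s : Int) (n : Int) (m : Int) : Prop :=
  s < n ∧ s < m →
    0 ≤ s ∧
    n ≤ (a.length : Int) ∧
    (∀ row ∈ (a.drop s.toNat).take (n - s).toNat, m ≤ (row.length : Int)) ∧
    (m - s) + (n - 1 - s) + (if s < n - 1 then m - 1 - s else 0) +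
      (if s < m - 1 then max (n - 2 - s) 0 else 0) ≤ (arr.length : Int)
instance (a : List (List Int)) (arr : List Int) (s : Int) (n : Int) (m : Int) : Decidable (Pre_apply a arr s n m) := by unfold Pre_apply; infer_instance
def pvWitness_apply : List (List Int) × List Int × Int × Int × Int := ([[0, 0], [0, 0]], [1, 2, 3, 4], 0, 2, 2)

def Spec_apply (a : List (List Int)) (arr : List Int) (s : Int) (n : Int) (m : Int) (out : List (List Int)) : Prop := out = apply_alt a arr s n m
instance (a : List (List Int)) (arr : List Int) (s : Int) (n : Int) (m : Int) (out : List (List Int)) : Decidable (Spec_apply a arr s n m out) := by unfold Spec_apply; infer_instance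

-- ===== CLAIM (what is proved, stated in full; the proofs are below) =====
def Claim_equal_apply : Prop := ∀ (a : List (List Int)) (arr : List Int) (s : Int) (n : Int) (m : Int), Dom_apply a arr s n m → Pre_apply a arr s n m → Spec_apply a arr s n m (apply a arr s n m)

-- ===== LEMMAS AND PROOFS =====

-- the no-done-list pair step of B's loops, parameterised by the write
def pvPair (g : List (List Int) → Int → Int → List (List Int))
    (p : List (List Int) × Int) (x : Int) : List (List Int) × Int := (g p.1 p.2 x, p.2 + 1)

-- the checked step A's loops reduce to on their acting line: skip if the cell is done, else write
def pvChk (cell : Int → List Int) (g : List (List Int) → Int → Int → List (List Int))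
    (st : PvSt) (x : Int) : PvSt :=
  if cell x ∈ st.done then st else ⟨g st.mat st.d x, st.d + 1, st.done ++ [cell x]⟩

lemma pvFoldl_id {α β : Type} (l : List β) (f : α → β → α) (st : α)
    (h : ∀ acc x, x ∈ l → f acc x = acc) : l.foldl f st = st := by
  induction l generalizing st with
  | nil => rfl
  | cons x t ih =>
    rw [List.foldl_cons, h st x (by simp)]
    exact ih st (fun acc y hy => h acc y (by simp [hy]))

lemma pvFoldl_outer_act {α β : Type} (f : α → β → α) (x : β) (t : List β) (st R : α)
    (hx : f st x = R) (ht : ∀ acc y, y ∈ t → f acc y = acc) :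
    (x :: t).foldl f st = R := by
  rw [List.foldl_cons, hx]; exact pvFoldl_id t f R ht

lemma pvFoldl_cons_eq {α β : Type} (f g : α → β → α) (x : β) (t : List β) (st : α)
    (hx : f st x = st) (ht : t.foldl f st = t.foldl g st) :
    (x :: t).foldl f st = t.foldl g st := by
  rw [List.foldl_cons, hx]; exact ht

lemma pvFoldl_act_last {α β : Type} (f : α → β → α) (t : List β) (x : β) (st : α)
    (ht : ∀ acc y, y ∈ t → f acc y = acc) :
    (t ++ [x]).foldl f st = f st x := by
  rw [List.foldl_append, pvFoldl_id t f st ht, List.foldl_cons, List.foldl_nil]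

lemma pvChk_skip (cell : Int → List Int) (g : List (List Int) → Int → Int → List (List Int))
    (l : List Int) (st : PvSt) (h : ∀ x ∈ l, cell x ∈ st.done) :
    l.foldl (pvChk cell g) st = st := by
  induction l with
  | nil => rfl
  | cons x t ih =>
    rw [List.foldl_cons, pvChk, if_pos (h x (by simp))]
    exact ih (fun y hy => h y (by simp [hy]))

lemma pvChk_run (cell : Int → List Int) (g : List (List Int) → Int → Int → List (List Int))
    (l : List Int) (st : PvSt)
    (hnd : ∀ x ∈ l, cell x ∉ st.done)
    (hpw : (l.map cell).Pairwise (· ≠ ·)) :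
    l.foldl (pvChk cell g) st =
      ⟨(l.foldl (pvPair g) (st.mat, st.d)).1, (l.foldl (pvPair g) (st.mat, st.d)).2,
        st.done ++ l.map cell⟩ := by
  induction l generalizing st with
  | nil => simp
  | cons x t ih =>
    rw [List.map_cons] at hpw
    obtain ⟨hpw1, hpw2⟩ := List.pairwise_cons.mp hpw
    rw [List.foldl_cons, List.foldl_cons, pvChk, if_neg (hnd x (by simp))]
    rw [ih ⟨g st.mat st.d x, st.d + 1, st.done ++ [cell x]⟩ ?_ hpw2]
    · simp [pvPair]
    · intro y hy
      simp only [List.mem_append, List.mem_singleton, not_or]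
      exact ⟨hnd y (by simp [hy]), fun hc => hpw1 (cell y) (List.mem_map_of_mem hy) hc.symm⟩

-- pairwise-distinct cell lists
lemma pvNe_pyRange (a b : Int) : (PySem.List.pyRange a b 1).Pairwise (· ≠ ·) :=
  (PySem.List.pairwise_lt_pyRange_one a b).imp (fun h => ne_of_lt h)

lemma pvNe_pyRange_neg (a b : Int) : (PySem.List.pyRange a b (-1)).Pairwise (· ≠ ·) := by
  rw [PySem.List.pyRange_neg_one_eq_reverse, List.pairwise_reverse]
  exact (PySem.List.pairwise_lt_pyRange_one (b + 1) (a + 1)).imp (fun h => (ne_of_lt h).symm)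

lemma pvPairNe_row (c : Int) (l : List Int) (h : l.Pairwise (· ≠ ·)) :
    (l.map (fun j => [c, j])).Pairwise (· ≠ ·) := by
  rw [List.pairwise_map]
  exact h.imp (fun hne => by simp [hne])

lemma pvPairNe_col (c : Int) (l : List Int) (h : l.Pairwise (· ≠ ·)) :
    (l.map (fun i => [i, c])).Pairwise (· ≠ ·) := by
  rw [List.pairwise_map]
  exact h.imp (fun hne => by simp [hne])

-- reduce A's four 2-D sweeps to the checked fold over their acting line (boundary non-empty case)
lemma pvPhase1 (arr : List Int) (s n m : Int) (st : PvSt) (hn : s < n) (_hm : s < m) :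
    (PySem.List.pyRange s n 1).foldl (fun st i =>
      (PySem.List.pyRange s m 1).foldl (fun st j =>
        if i = s ∧ [i, j] ∉ st.done then
          ⟨setCell st.mat i j (PySem.List.pyGetD arr st.d 0), st.d + 1, st.done ++ [[i, j]]⟩
        else st) st) st
    = (PySem.List.pyRange s m 1).foldl
        (pvChk (fun j => [s, j]) (fun mat d j => setCell mat s j (PySem.List.pyGetD arr d 0))) st := by
  rw [PySem.List.pyRange_one_cons hn]
  refine pvFoldl_outer_act _ _ _ _ _ ?_ ?_
  · exact PySem.List.foldl_congr_mem _ _ _ _ (fun acc j _ => by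
      by_cases hd : [s, j] ∈ acc.done <;> simp [pvChk, hd])
  · intro acc i hi
    have his : i ≠ s := by have := (PySem.List.mem_pyRange_one.mp hi).1; omega
    exact pvFoldl_id _ _ _ (fun acc2 j _ => by simp [his])

lemma pvPhase2 (arr : List Int) (s n m : Int) (st : PvSt) (hn : s < n) (hm : s < m) :
    (PySem.List.pyRange s n 1).foldl (fun st i =>
      (PySem.List.pyRange s m 1).foldl (fun st j =>
        if i ≠ s ∧ j = m - 1 ∧ [i, j] ∉ st.done then
          ⟨setCell st.mat i j (PySem.List.pyGetD arr st.d 0), st.d + 1, st.done ++ [[i, j]]⟩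
        else st) st) st
    = (PySem.List.pyRange (s + 1) n 1).foldl
        (pvChk (fun i => [i, m - 1]) (fun mat d i => setCell mat i (m - 1) (PySem.List.pyGetD arr d 0))) st := by
  rw [PySem.List.pyRange_one_cons hn]
  refine pvFoldl_cons_eq _ _ _ _ _ ?_ ?_
  · exact pvFoldl_id _ _ _ (fun acc2 j _ => by simp)
  · refine PySem.List.foldl_congr_mem _ _ _ _ (fun acc i hi => ?_)
    have his : i ≠ s := by have := (PySem.List.mem_pyRange_one.mp hi).1; omega
    show (PySem.List.pyRange s m 1).foldl _ acc = _
    have hone : PySem.List.pyRange (m - 1) m 1 = [m - 1] := by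
      rw [PySem.List.pyRange_one_cons (by omega), PySem.List.pyRange_one_eq_nil (by omega)]
    rw [PySem.List.pyRange_one_append s (m - 1) m (by omega) (by omega), hone]
    refine (pvFoldl_act_last _ _ _ _ ?_).trans ?_
    · intro acc2 j hj
      have : j < m - 1 := (PySem.List.mem_pyRange_one.mp hj).2
      simp [show j ≠ m - 1 by omega]
    · by_cases hd : [i, m - 1] ∈ acc.done <;> simp [pvChk, hd, his]

lemma pvPhase3 (arr : List Int) (s n m : Int) (st : PvSt) (hn : s < n) (hm : s < m) :
    (PySem.List.pyRange (n - 1) (s - 1) (-1)).foldl (fun st i =>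
      (PySem.List.pyRange (m - 1) (s - 1) (-1)).foldl (fun st j =>
        if i = n - 1 ∧ j ≠ m - 1 ∧ [i, j] ∉ st.done then
          ⟨setCell st.mat i j (PySem.List.pyGetD arr st.d 0), st.d + 1, st.done ++ [[i, j]]⟩
        else st) st) st
    = (PySem.List.pyRange (m - 2) (s - 1) (-1)).foldl
        (pvChk (fun j => [n - 1, j]) (fun mat d j => setCell mat (n - 1) j (PySem.List.pyGetD arr d 0))) st := by
  rw [PySem.List.pyRange_neg_one_cons (by omega : s - 1 < n - 1)]
  refine pvFoldl_outer_act _ _ _ _ _ ?_ ?_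
  · show (PySem.List.pyRange (m - 1) (s - 1) (-1)).foldl _ st = _
    rw [PySem.List.pyRange_neg_one_cons (by omega : s - 1 < m - 1),
      show (m : Int) - 1 - 1 = m - 2 from by ring]
    refine pvFoldl_cons_eq _ _ _ _ _ ?_ ?_
    · simp
    · refine PySem.List.foldl_congr_mem _ _ _ _ (fun acc j hj => ?_)
      have hjm : j ≤ m - 2 := (PySem.List.mem_pyRange_neg_one.mp hj).2
      by_cases hd : [(n : Int) - 1, j] ∈ acc.done <;>
        simp [pvChk, hd, show j ≠ m - 1 by omega]
  · intro acc i hi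
    have hin : i ≠ n - 1 := by have := (PySem.List.mem_pyRange_neg_one.mp hi).2; omega
    exact pvFoldl_id _ _ _ (fun acc2 j _ => by simp [hin])

lemma pvRange_neg_snoc (a b : Int) (h : b ≤ a) :
    PySem.List.pyRange a (b - 1) (-1) = PySem.List.pyRange a b (-1) ++ [b] := by
  rw [PySem.List.pyRange_neg_one_eq_reverse, PySem.List.pyRange_neg_one_eq_reverse,
    show b - 1 + 1 = b from by ring,
    PySem.List.pyRange_one_cons (by omega : b < a + 1), List.reverse_cons]

lemma pvPhase4 (arr : List Int) (s n m : Int) (st : PvSt) (hn : s < n) (hm : s < m) :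
    (PySem.List.pyRange (n - 1) (s - 1) (-1)).foldl (fun st i =>
      (PySem.List.pyRange (m - 1) (s - 1) (-1)).foldl (fun st j =>
        if i ≠ n - 1 ∧ j = s ∧ [i, j] ∉ st.done then
          ⟨setCell st.mat i j (PySem.List.pyGetD arr st.d 0), st.d + 1, st.done ++ [[i, j]]⟩
        else st) st) st
    = (PySem.List.pyRange (n - 2) (s - 1) (-1)).foldl
        (pvChk (fun i => [i, s]) (fun mat d i => setCell mat i s (PySem.List.pyGetD arr d 0))) st := by
  rw [PySem.List.pyRange_neg_one_cons (by omega : s - 1 < n - 1),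
    show (n : Int) - 1 - 1 = n - 2 from by ring]
  refine pvFoldl_cons_eq _ _ _ _ _ ?_ ?_
  · exact pvFoldl_id _ _ _ (fun acc2 j _ => by simp)
  · refine PySem.List.foldl_congr_mem _ _ _ _ (fun acc i hi => ?_)
    have hin : i ≠ n - 1 := by have := (PySem.List.mem_pyRange_neg_one.mp hi).2; omega
    show (PySem.List.pyRange (m - 1) (s - 1) (-1)).foldl _ acc = _
    rw [pvRange_neg_snoc (m - 1) s (by omega)]
    refine (pvFoldl_act_last _ _ _ _ ?_).trans ?_
    · intro acc2 j hj
      have : s < j := (PySem.List.mem_pyRange_neg_one.mp hj).1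
      simp [show j ≠ s by omega]
    · by_cases hd : [i, s] ∈ acc.done <;> simp [pvChk, hd, hin]

lemma pvMain (a : List (List Int)) (arr : List Int) (s n m : Int) :
    apply a arr s n m = apply_alt a arr s n m := by
  unfold apply apply_alt
  by_cases hg : s < n ∧ s < m
  · obtain ⟨hn, hm⟩ := hg
    rw [if_pos ⟨hn, hm⟩]
    dsimp only
    rw [pvPhase1 arr s n m _ hn hm, pvPhase2 arr s n m _ hn hm,
      pvPhase3 arr s n m _ hn hm, pvPhase4 arr s n m _ hn hm]
    rw [pvChk_run _ _ _ _ (by simp) (pvPairNe_row s _ (pvNe_pyRange s m))]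
    rw [pvChk_run _ _ _ _ (by
        intro i hi
        have h1 := (PySem.List.mem_pyRange_one.mp hi).1
        simp [PySem.List.mem_pyRange_one]
        omega)
      (pvPairNe_col (m - 1) _ (pvNe_pyRange (s + 1) n))]
    dsimp only
    by_cases h3 : s < n - 1
    · rw [if_pos h3]
      rw [pvChk_run _ _ _ _ (by
          intro j hj
          obtain ⟨hj1, hj2⟩ := PySem.List.mem_pyRange_neg_one.mp hj
          simp [PySem.List.mem_pyRange_one]
          omega)
        (pvPairNe_row (n - 1) _ (pvNe_pyRange_neg (m - 2) (s - 1)))]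
      dsimp only
      by_cases h4 : s < m - 1
      · rw [if_pos h4]
        rw [pvRange_neg_snoc (n - 2) s (by omega), List.foldl_append]
        rw [pvChk_run _ _ _ _ (by
            intro i hi
            obtain ⟨hi1, hi2⟩ := PySem.List.mem_pyRange_neg_one.mp hi
            simp [PySem.List.mem_pyRange_one, PySem.List.mem_pyRange_neg_one]
            omega)
          (pvPairNe_col s _ (pvNe_pyRange_neg (n - 2) s))]
        dsimp only
        rw [List.foldl_cons, List.foldl_nil, pvChk, if_pos (by
          simp [PySem.List.mem_pyRange_one]
          omega)]
        dsimp only [pvPair]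
        rfl
      · rw [if_neg h4]
        rw [pvChk_skip _ _ _ _ (by
          intro i hi
          obtain ⟨hi1, hi2⟩ := PySem.List.mem_pyRange_neg_one.mp hi
          simp [PySem.List.mem_pyRange_one, PySem.List.mem_pyRange_neg_one]
          omega)]
        dsimp only [pvPair]
        rfl
    · rw [if_neg h3]
      rw [pvChk_skip _ _ _ _ (by
        intro i hi
        obtain ⟨hi1, hi2⟩ := PySem.List.mem_pyRange_neg_one.mp hi
        exact absurd rfl (by omega : ¬ (0 : Int) = 0))]
      rw [pvChk_skip _ _ _ _ (by
        intro j hj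
        obtain ⟨hj1, hj2⟩ := PySem.List.mem_pyRange_neg_one.mp hj
        simp [PySem.List.mem_pyRange_one]
        omega)]
      by_cases h4 : s < m - 1
      · rw [if_pos h4, PySem.List.pyRange_neg_one_eq_nil (by omega : n - 2 ≤ s), List.foldl_nil]
        dsimp only [pvPair]
        rfl
      · rw [if_neg h4]
        dsimp only [pvPair]
        rfl
  · rw [if_neg hg]
    rcases (by omega : n ≤ s ∨ m ≤ s) with h | h
    · rw [PySem.List.pyRange_one_eq_nil h,
        PySem.List.pyRange_neg_one_eq_nil (by omega : n - 1 ≤ s - 1)]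
      rfl
    · rw [PySem.List.pyRange_one_eq_nil h,
        PySem.List.pyRange_neg_one_eq_nil (by omega : m - 1 ≤ s - 1)]
      simp only [List.foldl_nil]
      rw [pvFoldl_id _ _ _ (fun acc x _ => rfl), pvFoldl_id _ _ _ (fun acc x _ => rfl),
        pvFoldl_id _ _ _ (fun acc x _ => rfl), pvFoldl_id _ _ _ (fun acc x _ => rfl)]

-- ===== VERDICT (by name: the statement is the Claim_ definition above) =====
theorem apply_spec : Claim_equal_apply := by
  intro a arr s n m _ _
  exact pvMain a arr s n m
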